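-- pv_equiv track=rewrite | github.com/Dhiwakar1997/Assainments | CN/singleBitError.py | detect_single_bit_error
-- ===== SOURCE A (Python) =====
-- def detect_single_bit_error(data_bits, parity_code):
--     """
--     Detects single bit errors in the given data bits using a parity code.
--     The parity code can be either 'odd' or 'even'.
--     Returns the corrected data bits if a single bit error is detected,
--     otherwise returns the original data bits.
--     """
--     # Calculate the expected parity bit based on the parity code
--     if parity_code == 'odd':
--         expected_parity_bit = 1
--     elif parity_code == 'even':
--         expected_parity_bit = 0
--     else:
--         raise ValueError("Invalid parity code: must be 'odd' or 'even'")
--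
--     # Calculate the actual parity bit from the data bits
--     actual_parity_bit = sum(data_bits) % 2
--
--     # Check if a single bit error has occurred
--     if actual_parity_bit != expected_parity_bit:
--         # Determine the position of the error bit
--         error_bit_position = len(data_bits) - 1
--
--         # Iterate over the data bits from right to left to find the error bit
--         for i in range(len(data_bits) - 1, -1, -1):
--             # Create a copy of the data bits with the current bit flipped
--             flipped_data_bits = list(data_bits)
--             flipped_data_bits[i] = 1 - flipped_data_bits[i]
--
--             # Calculate the parity bit for the flipped data bits
--             flipped_parity_bit = sum(flipped_data_bits) % 2
--
--             # If the flipped data bits have the expected parity bit, return them as the corrected data bits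
--             if flipped_parity_bit == expected_parity_bit:
--                 return flipped_data_bits
--
--             # Otherwise, update the error bit position and continue iterating
--             error_bit_position = i
--
--         # If the error bit cannot be determined, return the original data bits
--         return data_bits
--     else:
--         # No error detected, return the original data bits
--         return data_bits
-- ===== SOURCE B (Python) =====
-- def detect_single_bit_error(data_bits, parity_code):
--     if parity_code == 'odd':
--         expected_parity_bit = 1
--     elif parity_code == 'even':
--         expected_parity_bit = 0
--     else:
--         raise ValueError("Invalid parity code: must be 'odd' or 'even'")
--     if sum(data_bits) % 2 == expected_parity_bit or not data_bits:
--         return data_bits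
--     # Flipping any bit toggles the parity, so A's right-to-left scan always
--     # succeeds at the last bit: flip it directly, no loop needed.
--     return data_bits[:-1] + [1 - data_bits[-1]]
-- ===== Notes on version B (the rewrite author's own statement) =====
-- stated objective: simpler
-- what changed: Replaces A's right-to-left scan over candidate flips (which always succeeds on its first iteration, since flipping any bit toggles the parity) with a direct closed-form flip of the last bit.
import Mathlib
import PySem

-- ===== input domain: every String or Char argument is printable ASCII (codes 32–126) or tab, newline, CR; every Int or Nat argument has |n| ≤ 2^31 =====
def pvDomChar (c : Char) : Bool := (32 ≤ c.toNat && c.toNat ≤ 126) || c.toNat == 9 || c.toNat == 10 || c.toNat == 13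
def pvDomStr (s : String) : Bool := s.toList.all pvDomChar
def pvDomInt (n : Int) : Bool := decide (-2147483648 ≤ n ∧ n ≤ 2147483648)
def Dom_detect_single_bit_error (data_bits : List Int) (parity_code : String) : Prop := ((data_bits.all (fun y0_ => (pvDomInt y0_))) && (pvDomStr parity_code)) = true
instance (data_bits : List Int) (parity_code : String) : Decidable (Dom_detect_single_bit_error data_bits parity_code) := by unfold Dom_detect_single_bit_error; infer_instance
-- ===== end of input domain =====

-- B replaces A's right-to-left scan over candidate flips (which always succeeds on its
-- first iteration, since flipping any bit toggles the parity) with a direct flip of the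
-- last bit; objective: simpler. Return value only (no argument is mutated by either).

-- ===== PORT A =====
-- the 'for i in range(len(data_bits)-1, -1, -1)' loop of A, step for step (the
-- 'error_bit_position' variable is updated but never read, so it carries no state)
def pvALoop (data_bits : List Int) (expected : Int) : List Int → List Int
  | [] => data_bits
  | i :: rest =>
      let flipped := PySem.List.pySetD data_bits i (1 - PySem.List.pyGetD data_bits i 0)
      if PySem.Int.mod flipped.sum 2 = expected then flipped
      else pvALoop data_bits expected rest

-- body after expected_parity_bit has been set
def pvABody (data_bits : List Int) (expected : Int) : List Int :=
  let actual := PySem.Int.mod data_bits.sum 2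
  if actual ≠ expected then
    pvALoop data_bits expected (PySem.List.pyRange ((data_bits.length : Int) - 1) (-1) (-1))
  else data_bits

def detect_single_bit_error (data_bits : List Int) (parity_code : String) : List Int :=
  if parity_code = "odd" then pvABody data_bits 1
  else if parity_code = "even" then pvABody data_bits 0
  else data_bits  -- Python raises ValueError here; excluded by Pre_

-- ===== PORT B =====
def detect_single_bit_error_alt (data_bits : List Int) (parity_code : String) : List Int :=
  if parity_code = "odd" then pvBBody data_bits 1
  else if parity_code = "even" then pvBBody data_bits 0
  else data_bits  -- Python raises ValueError here; excluded by Pre_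
where
  pvBBody (data_bits : List Int) (expected : Int) : List Int :=
    if PySem.Int.mod data_bits.sum 2 = expected ∨ data_bits = [] then data_bits
    else PySem.List.slice data_bits none (some (-1)) ++ [1 - PySem.List.pyGetD data_bits (-1) 0]

-- ===== PRECONDITION & SPEC =====
-- A raises ValueError for any parity_code other than 'odd'/'even'; exactly those are excluded.
def Pre_detect_single_bit_error (data_bits : List Int) (parity_code : String) : Prop :=
  parity_code = "odd" ∨ parity_code = "even"
instance (data_bits : List Int) (parity_code : String) : Decidable (Pre_detect_single_bit_error data_bits parity_code) := by unfold Pre_detect_single_bit_error; infer_instance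

def pvWitness_detect_single_bit_error : List Int × String := ([1, 0, 1], "odd")

def Spec_detect_single_bit_error (data_bits : List Int) (parity_code : String) (out : List Int) : Prop := out = detect_single_bit_error_alt data_bits parity_code
instance (data_bits : List Int) (parity_code : String) (out : List Int) : Decidable (Spec_detect_single_bit_error data_bits parity_code out) := by unfold Spec_detect_single_bit_error; infer_instance

-- ===== CLAIM (what is proved, stated in full; the proofs are below) =====
def Claim_equal_detect_single_bit_error : Prop := ∀ (data_bits : List Int) (parity_code : String), Dom_detect_single_bit_error data_bits parity_code → Pre_detect_single_bit_error data_bits parity_code → Spec_detect_single_bit_error data_bits parity_code (detect_single_bit_error data_bits parity_code)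

-- ===== LEMMAS AND PROOFS =====

-- core: for either expected parity bit, A's body and B's body agree
theorem pvBody_eq (data_bits : List Int) (expected : Int)
    (hexp : expected = 0 ∨ expected = 1) :
    pvABody data_bits expected = detect_single_bit_error_alt.pvBBody data_bits expected := by
  rcases List.eq_nil_or_concat data_bits with hnil | ⟨ys, x, hconcat⟩
  · subst hnil
    simp [pvABody, detect_single_bit_error_alt.pvBBody, PySem.List.pyRange_neg_one_eq_nil,
      pvALoop, PySem.Int.mod]
  · rw [List.concat_eq_append] at hconcat; subst hconcat
    have h2 : (0:Int) < 2 := by norm_num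
    have hA : PySem.Int.mod (ys ++ [x]).sum 2 = (ys.sum + x) % 2 := by
      rw [PySem.Int.mod_eq_emod_of_pos h2]; simp
    by_cases hpar : (ys.sum + x) % 2 = expected
    · simp [pvABody, detect_single_bit_error_alt.pvBBody, hpar]
    · -- parity mismatch: A's loop fires on its very first index, len-1
      have hlen : ((ys ++ [x]).length : Int) - 1 = (ys.length : Int) := by
        simp
      have hrange : PySem.List.pyRange (((ys ++ [x]).length : Int) - 1) (-1) (-1)
          = ((ys.length : Int)) :: PySem.List.pyRange ((ys.length : Int) - 1) (-1) (-1) := by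
        rw [hlen, PySem.List.pyRange_neg_one_cons (by omega)]
      have hget : PySem.List.pyGetD (ys ++ [x]) ((ys.length : Int)) 0 = x := by
        simp [PySem.List.pyGetD_natCast, List.getD]
      have hset : PySem.List.pySetD (ys ++ [x]) ((ys.length : Int)) (1 - x) = ys ++ [1 - x] := by
        rw [PySem.List.pySetD_natCast]; simp
      have hgetneg : PySem.List.pyGetD (ys ++ [x]) (-1) 0 = x := by
        unfold PySem.List.pyGetD
        rw [PySem.List.pyGet?_neg_one]; simp
      have hflip : PySem.Int.mod (ys ++ [1 - x]).sum 2 = expected := by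
        rw [PySem.Int.mod_eq_emod_of_pos h2]
        simp only [List.sum_append, List.sum_cons, List.sum_nil, add_zero]
        omega
      unfold pvABody detect_single_bit_error_alt.pvBBody
      simp only [hA, hrange, ne_eq, hpar, not_false_eq_true,
        List.append_ne_nil_of_right_ne_nil, if_false, pvALoop, hget, hset, hflip,
        if_pos, PySem.List.slice_to_neg_one, hgetneg, List.dropLast_concat,
        List.cons_ne_self, or_self]

-- ===== VERDICT (by name: the statement is the Claim_ definition above) =====
theorem detect_single_bit_error_spec : Claim_equal_detect_single_bit_error := by
  intro data_bits parity_code _ hpre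
  unfold Spec_detect_single_bit_error detect_single_bit_error detect_single_bit_error_alt
  rcases hpre with h | h <;> subst h <;> simp <;>
    [exact pvBody_eq data_bits 1 (Or.inr rfl); exact pvBody_eq data_bits 0 (Or.inl rfl)]
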